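-- pv_equiv track=rewrite | github.com/tomer-w/nmea2000 | nmea2000/utils.py | decode_bit_lookup
-- ===== SOURCE A (Python) =====
-- def decode_bit_lookup(data_raw: int, bit_lookup_dict: dict) -> str:
--     bit = 0
--     flags = []
--     while data_raw !=0:
--         if data_raw & 1 == 1:
--             str = bit_lookup_dict.get(bit, None)
--             if str is not None:
--                 flags.append(str)
--         bit +=1
--         data_raw >>= 1
--     return ', '.join(flags)
-- ===== SOURCE B (Python) =====
-- def decode_bit_lookup(data_raw: int, bit_lookup_dict: dict) -> str:
--     flags = [bit_lookup_dict[bit] for bit in sorted(bit_lookup_dict)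
--              if bit >= 0 and (data_raw >> bit) & 1]
--     return ', '.join(flags)
-- ===== Notes on version B (the rewrite author's own statement) =====
-- stated objective: idiomatic
-- what changed: B iterates over sorted(bit_lookup_dict) testing (data_raw >> bit) & 1 per key and joins the hits, instead of A's while-loop that repeatedly shifts data_raw and walks every bit position; Pre_ excludes negative data_raw, on which A's while loop never terminates.
import Mathlib
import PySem

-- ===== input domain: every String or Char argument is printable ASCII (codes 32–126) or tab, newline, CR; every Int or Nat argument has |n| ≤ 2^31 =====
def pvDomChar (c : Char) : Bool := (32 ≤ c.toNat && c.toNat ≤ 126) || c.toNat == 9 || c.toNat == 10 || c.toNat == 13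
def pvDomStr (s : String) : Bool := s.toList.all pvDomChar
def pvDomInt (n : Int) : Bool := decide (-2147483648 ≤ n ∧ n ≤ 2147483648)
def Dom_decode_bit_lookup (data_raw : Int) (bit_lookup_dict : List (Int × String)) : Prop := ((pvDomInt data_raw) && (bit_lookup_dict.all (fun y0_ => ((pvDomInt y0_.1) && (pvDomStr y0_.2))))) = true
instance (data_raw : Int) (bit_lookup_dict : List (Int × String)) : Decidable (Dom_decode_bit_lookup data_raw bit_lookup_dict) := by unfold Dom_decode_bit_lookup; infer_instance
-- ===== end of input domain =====

-- B iterates over the sorted lookup keys and tests each bit of data_raw directly,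
-- instead of A's shift-and-walk over every bit of data_raw (objective: idiomatic).

-- termination helper for the A-side loop (cited by decreasing_by)
theorem pvShiftToNatLt (d : Int) (h : ¬ d ≤ 0) : (d >>> (1:Nat)).toNat < d.toNat := by
  obtain ⟨m, rfl⟩ := Int.eq_ofNat_of_zero_le (by omega : (0:Int) ≤ d)
  have he : ((m:Int) >>> (1:Nat)) = ((m >>> 1 : Nat) : Int) := Int.mem_toNat?.mp rfl
  rw [he, Int.toNat_natCast, Int.toNat_natCast, Nat.shiftRight_one]
  omega

-- ===== PORT A =====
-- literal port of A's while loop; the `d ≤ 0` stop is exact for d ≥ 0 (all of Pre_):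
-- on negative data_raw the Python loop never terminates (excluded by Pre_).
def decodeLoopA (dict : PySem.Dict Int String) (d : Int) (bit : Int) (flags : List String) : List String :=
  if h : d ≤ 0 then flags
  else
    let flags' := if PySem.Int.band d 1 = 1 then  -- data_raw & 1 == 1
        match dict.get? bit with                   -- bit_lookup_dict.get(bit, None)
        | some s => flags ++ [s]
        | none => flags
      else flags
    decodeLoopA dict (d >>> (1:Nat)) (bit + 1) flags'
termination_by d.toNat
decreasing_by exact pvShiftToNatLt d h

def decode_bit_lookup (data_raw : Int) (bit_lookup_dict : List (Int × String)) : String :=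
  PySem.Str.join ", " (decodeLoopA (PySem.Dict.ofList bit_lookup_dict) data_raw 0 [])

-- ===== PORT B =====
def decode_bit_lookup_alt (data_raw : Int) (bit_lookup_dict : List (Int × String)) : String :=
  let d := PySem.Dict.ofList bit_lookup_dict
  let flags := ((PySem.List.sorted d.keys (fun x => x) false).filter
      (fun bit => decide (0 ≤ bit) && (PySem.Int.band (data_raw >>> bit.toNat) 1 == 1))).map
      (fun bit => d.getD bit "")                   -- bit_lookup_dict[bit]; key is present, so getD never defaults
  PySem.Str.join ", " flags

-- ===== PRECONDITION & SPEC =====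
-- Pre_ excludes only negative data_raw, on which A's `while data_raw != 0` loop never
-- terminates (arithmetic right shift of a negative int never reaches 0).
def Pre_decode_bit_lookup (data_raw : Int) (bit_lookup_dict : List (Int × String)) : Prop :=
  0 ≤ data_raw
instance (data_raw : Int) (bit_lookup_dict : List (Int × String)) : Decidable (Pre_decode_bit_lookup data_raw bit_lookup_dict) := by unfold Pre_decode_bit_lookup; infer_instance

def pvWitness_decode_bit_lookup : Int × (List (Int × String)) := (5, [(0, "a"), (2, "b"), (7, "c")])

def Spec_decode_bit_lookup (data_raw : Int) (bit_lookup_dict : List (Int × String)) (out : String) : Prop := out = decode_bit_lookup_alt data_raw bit_lookup_dict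
instance (data_raw : Int) (bit_lookup_dict : List (Int × String)) (out : String) : Decidable (Spec_decode_bit_lookup data_raw bit_lookup_dict out) := by unfold Spec_decode_bit_lookup; infer_instance

-- ===== CLAIM (what is proved, stated in full; the proofs are below) =====
def Claim_equal_decode_bit_lookup : Prop := ∀ (data_raw : Int) (bit_lookup_dict : List (Int × String)), Dom_decode_bit_lookup data_raw bit_lookup_dict → Pre_decode_bit_lookup data_raw bit_lookup_dict → Spec_decode_bit_lookup data_raw bit_lookup_dict (decode_bit_lookup data_raw bit_lookup_dict)

-- ===== LEMMAS AND PROOFS =====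

-- the ascending bit positions (offset by b) of the set bits of n
def bitsOf (n : Nat) (b : Int) : List Int :=
  if n = 0 then [] else (if n % 2 = 1 then [b] else []) ++ bitsOf (n / 2) (b + 1)
termination_by n
decreasing_by omega

theorem decodeLoopA_eq_bitsOf (dict : PySem.Dict Int String) :
    ∀ (n : Nat) (b : Int) (flags : List String),
      decodeLoopA dict (n : Nat) b flags = flags ++ (bitsOf n b).filterMap dict.get? := by
  intro n
  induction n using Nat.strong_induction_on with
  | _ n ih =>
    intro b flags
    rw [decodeLoopA, bitsOf]
    by_cases h0 : n = 0
    · simp [h0]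
    · rw [dif_neg (by exact_mod_cast (by omega : ¬ (n:Int) ≤ 0))]
      rw [if_neg h0]
      have hsh : ((n:Int) >>> (1:Nat)) = ((n / 2 : Nat) : Int) := by
        rw [show ((n:Int) >>> (1:Nat)) = ((n >>> 1 : Nat) : Int) from Int.mem_toNat?.mp rfl,
          Nat.shiftRight_one]
      have hband : PySem.Int.band (n:Int) 1 = ((n % 2 : Nat) : Int) := by
        rw [show ((1:Int)) = ((1:Nat):Int) from rfl, PySem.Int.band_natCast, Nat.and_one_is_mod]
      rw [hsh, hband, ih (n / 2) (by omega) (b + 1), List.filterMap_append]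
      by_cases ho : n % 2 = 1
      · rw [if_pos (by exact_mod_cast ho), ho]
        cases hg : dict.get? b <;> simp [hg]
      · rw [if_neg (by exact_mod_cast (show ¬ ((n % 2 : Nat) : Int) = 1 by exact_mod_cast ho))]
        simp [if_neg ho]

theorem mem_bitsOf : ∀ (n : Nat) (b k : Int),
    k ∈ bitsOf n b ↔ b ≤ k ∧ n / 2 ^ (k - b).toNat % 2 = 1 := by
  intro n
  induction n using Nat.strong_induction_on with
  | _ n ih =>
    intro b k
    rw [bitsOf]
    by_cases h0 : n = 0
    · simp [h0]
    · rw [if_neg h0]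
      have ih2 := ih (n / 2) (by omega) (b + 1) k
      constructor
      · intro hmem
        rcases List.mem_append.mp hmem with h | h
        · have hk : k = b := by
            by_cases ho : n % 2 = 1 <;> simp [ho] at h; exact h
          have ho : n % 2 = 1 := by by_cases ho : n % 2 = 1 <;> simp [ho] at h; omega
          subst hk
          refine ⟨le_refl _, ?_⟩
          simp [ho]
        · obtain ⟨hbk, hd⟩ := ih2.mp h
          refine ⟨by omega, ?_⟩
          have ht : (k - b).toNat = (k - (b + 1)).toNat + 1 := by omega
          rw [ht, pow_succ]
          rw [Nat.div_div_eq_div_mul, Nat.mul_comm] at hd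
          exact hd
      · rintro ⟨hbk, hd⟩
        by_cases hk : k = b
        · subst hk
          have hz : (k - k).toNat = 0 := by omega
          rw [hz] at hd
          simp at hd
          simp [hd]
        · have hbk1 : b + 1 ≤ k := by omega
          refine List.mem_append.mpr (Or.inr (ih2.mpr ⟨hbk1, ?_⟩))
          have ht : (k - b).toNat = (k - (b + 1)).toNat + 1 := by omega
          rw [ht, pow_succ] at hd
          rw [Nat.div_div_eq_div_mul, Nat.mul_comm]
          exact hd

theorem bitsOf_pairwise (n : Nat) (b : Int) : (bitsOf n b).Pairwise (· < ·) := by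
  induction n using Nat.strong_induction_on generalizing b with
  | _ n ih =>
    rw [bitsOf]
    by_cases h0 : n = 0
    · simp [h0]
    · rw [if_neg h0]
      refine List.pairwise_append.mpr ⟨?_, ih (n / 2) (by omega) (b + 1), ?_⟩
      · by_cases ho : n % 2 = 1 <;> simp [ho]
      · intro x hx y hy
        have := (mem_bitsOf (n / 2) (b + 1) y).mp hy
        by_cases ho : n % 2 = 1 <;> simp [ho] at hx
        subst hx; omega

theorem filterMap_get?_eq (dict : PySem.Dict Int String) (l : List Int) :
    l.filterMap dict.get? = (l.filter (fun k => dict.contains k)).map (fun k => dict.getD k "") := by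
  induction l with
  | nil => rfl
  | cons x xs ih =>
    rw [List.filterMap_cons, List.filter_cons]
    cases hg : dict.get? x with
    | none =>
      have hc : dict.contains x = false := by
        rw [PySem.Dict.contains_eq_isSome_get?, hg]; rfl
      simp [hc, ih]
    | some v =>
      have hc : dict.contains x = true := by
        rw [PySem.Dict.contains_eq_isSome_get?, hg]; rfl
      have hgd : dict.getD x "" = v := PySem.Dict.getD_of_get?_eq_some dict "" hg
      simp [hc, ih, hgd]

theorem bandShiftIff (n : Nat) (k : Int) :
    (PySem.Int.band ((n : Int) >>> ((k.toNat : Nat) : Int)) 1 == 1) = true ↔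
      n / 2 ^ k.toNat % 2 = 1 := by
  rw [Int.shiftRight_natCast]
  rw [show ((1:Int)) = ((1:Nat):Int) from rfl, PySem.Int.band_natCast]
  rw [Nat.and_one_is_mod, Nat.shiftRight_eq_div_pow]
  constructor
  · intro h; have := beq_iff_eq.mp h; exact_mod_cast this
  · intro h; exact beq_iff_eq.mpr (by exact_mod_cast h)

theorem eq_of_pairwise_lt_ext (l₁ l₂ : List Int)
    (h₁ : l₁.Pairwise (· < ·)) (h₂ : l₂.Pairwise (· < ·))
    (hm : ∀ x, x ∈ l₁ ↔ x ∈ l₂) : l₁ = l₂ := by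
  have nd₁ : l₁.Nodup := h₁.imp (fun h => ne_of_lt h)
  have nd₂ : l₂.Nodup := h₂.imp (fun h => ne_of_lt h)
  exact ((List.perm_ext_iff_of_nodup nd₁ nd₂).mpr hm).eq_of_pairwise
    (fun a b _ _ h h' => absurd h (asymm h')) h₁ h₂

-- ===== VERDICT (by name: the statement is the Claim_ definition above) =====
theorem decode_bit_lookup_spec : Claim_equal_decode_bit_lookup := by
  intro data_raw dictL _ hpre
  unfold Spec_decode_bit_lookup
  obtain ⟨n, rfl⟩ := Int.eq_ofNat_of_zero_le hpre
  unfold decode_bit_lookup decode_bit_lookup_alt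
  set D := PySem.Dict.ofList dictL with hD
  rw [decodeLoopA_eq_bitsOf, List.nil_append, filterMap_get?_eq]
  congr 2
  apply eq_of_pairwise_lt_ext
  · exact (bitsOf_pairwise n 0).filter _
  · refine List.Pairwise.filter _ ?_
    have hnd : (PySem.List.sorted D.keys (fun x => x) false).Nodup :=
      (PySem.List.sorted_perm _ _ _).nodup_iff.mpr (PySem.Dict.nodup_keys_ofList dictL)
    have hle : (PySem.List.sorted D.keys (fun x => x) false).Pairwise (fun a b => a ≤ b) :=
      PySem.List.sorted_pairwise _ _
    exact (hle.and hnd).imp (fun h => lt_of_le_of_ne h.1 h.2)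
  · intro k
    rw [List.mem_filter, List.mem_filter, mem_bitsOf, PySem.List.mem_sorted]
    rw [PySem.Dict.contains_eq_decide_mem_keys]
    simp only [Bool.and_eq_true, decide_eq_true_eq, bandShiftIff]
    constructor
    · rintro ⟨⟨h0, hb⟩, hk⟩
      have hz : k - 0 = k := by omega
      rw [hz] at hb
      exact ⟨hk, h0, hb⟩
    · rintro ⟨hk, h0, hb⟩
      have hz : k - 0 = k := by omega
      exact ⟨⟨h0, by rwa [hz]⟩, hk⟩
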